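-- pv_equiv track=rewrite | github.com/LiXuanqi/leetcode-solutions | python3/809.expressive-words.py | is_stretchy
-- ===== SOURCE A (Python) =====
-- def is_stretchy(word, s):
--     i = 0
--     j = 0
--     while i < len(word) and j < len(s):
--         if word[i] != s[j]:
--             return False
--         else:
--             # count and skip the same characters
--             count_i = 1
--             while i + 1 < len(word) and word[i + 1] == word[i]:
--                 i += 1
--                 count_i += 1
--             count_j = 1
--             while j + 1 < len(s) and s[j + 1] == s[j]:
--                 j += 1
--                 count_j += 1
--             if count_i > count_j:
--                 return False
--             elif count_i < count_j and count_j <= 2: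
--                 return False
--             else:
--                 i += 1
--                 j += 1
--     return i == len(word) and j == len(s)
-- ===== SOURCE B (Python) =====
-- def _rle(t):
--     # run-length encode: list of (char, run length) pairs, scanning run by run
--     runs = []
--     i = 0
--     n = len(t)
--     while i < n:
--         j = i
--         while j < n and t[j] == t[i]:
--             j += 1
--         runs.append((t[i], j - i))
--         i = j
--     return runs
--
-- def is_stretchy(word, s):
--     rw = _rle(word)
--     rs = _rle(s)
--     if len(rw) != len(rs):
--         return False
--     return all(not (cw != cs or nw > ns or (nw < ns and ns <= 2))
--                for (cw, nw), (cs, ns) in zip(rw, rs))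
-- ===== Notes on version B (the rewrite author's own statement) =====
-- stated objective: idiomatic
-- what changed: Replaces A's interleaved two-pointer scan (counting and comparing runs of both strings on the fly with early returns) by first run-length encoding both strings into (char,count) lists, then comparing list lengths and checking each zipped pair.
import Mathlib
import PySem

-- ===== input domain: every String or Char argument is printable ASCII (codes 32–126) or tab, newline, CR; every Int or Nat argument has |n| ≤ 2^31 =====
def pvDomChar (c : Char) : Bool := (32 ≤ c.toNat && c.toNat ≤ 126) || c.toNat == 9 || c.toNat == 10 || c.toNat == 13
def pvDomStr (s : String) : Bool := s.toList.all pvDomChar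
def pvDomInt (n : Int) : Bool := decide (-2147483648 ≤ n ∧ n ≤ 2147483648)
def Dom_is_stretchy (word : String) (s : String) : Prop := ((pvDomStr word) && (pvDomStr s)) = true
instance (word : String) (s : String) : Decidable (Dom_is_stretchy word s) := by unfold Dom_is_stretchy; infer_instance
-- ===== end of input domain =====

-- B rewrites A's interleaved two-pointer scan as: run-length encode both strings, then
-- compare the two run lists pairwise (idiomatic decomposition; same asymptotic cost).

-- ===== PORT A =====
-- A's inner 'while word[i+1] == word[i]' loops: count a run of c and return the rest.
def countSkip (c : Char) : List Char → Nat × List Char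
  | [] => (0, [])
  | x :: xs => if x == c then ((countSkip c xs).1 + 1, (countSkip c xs).2) else (0, x :: xs)

theorem countSkip_length_le (c : Char) (t : List Char) : (countSkip c t).2.length ≤ t.length := by
  induction t with
  | nil => simp [countSkip]
  | cons x xs ih =>
    simp only [countSkip]
    split
    · simp; omega
    · simp

def goA : List Char → List Char → Bool
  | c :: w, d :: s =>
    if c ≠ d then false
    else
      let ci := 1 + (countSkip c w).1
      let cj := 1 + (countSkip d s).1
      if ci > cj then false
      else if ci < cj ∧ cj ≤ 2 then false
      else goA (countSkip c w).2 (countSkip d s).2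
  | w, s => w.isEmpty && s.isEmpty
termination_by w _ => w.length
decreasing_by have := countSkip_length_le c w; simp; omega

def is_stretchy (word : String) (s : String) : Bool := goA word.toList s.toList

-- ===== PORT B =====
-- Source B's _rle: scan run by run, emit (char, run length).
def rleB : List Char → List (Char × Nat)
  | [] => []
  | c :: t => (c, 1 + (t.takeWhile (· == c)).length) :: rleB (t.dropWhile (· == c))
termination_by t => t.length
decreasing_by have := t.length_dropWhile_le (p := (· == c)); simp; omega

def pairOk (p : (Char × Nat) × (Char × Nat)) : Bool :=
  !(p.1.1 != p.2.1 || decide (p.2.2 < p.1.2) || (decide (p.1.2 < p.2.2) && decide (p.2.2 ≤ 2)))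

def is_stretchy_alt (word : String) (s : String) : Bool :=
  let rw := rleB word.toList
  let rs := rleB s.toList
  rw.length == rs.length && (rw.zip rs).all pairOk

-- ===== PRECONDITION & SPEC =====
def Spec_is_stretchy (word : String) (s : String) (out : Bool) : Prop := out = is_stretchy_alt word s
instance (word : String) (s : String) (out : Bool) : Decidable (Spec_is_stretchy word s out) := by unfold Spec_is_stretchy; infer_instance

-- ===== CLAIM (what is proved, stated in full; the proofs are below) =====
def Claim_equal_is_stretchy : Prop := ∀ (word : String) (s : String), Dom_is_stretchy word s → Spec_is_stretchy word s (is_stretchy word s)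

-- ===== LEMMAS AND PROOFS =====

def checkB (rw rs : List (Char × Nat)) : Bool := rw.length == rs.length && (rw.zip rs).all pairOk

theorem countSkip_eq (c : Char) (t : List Char) :
    countSkip c t = ((t.takeWhile (· == c)).length, t.dropWhile (· == c)) := by
  induction t with
  | nil => simp [countSkip]
  | cons x xs ih =>
    simp only [countSkip, List.takeWhile, List.dropWhile]
    by_cases h : x == c
    · simp [h, ih]
    · simp [h]

theorem checkB_cons (x y : Char × Nat) (rw rs : List (Char × Nat)) :
    checkB (x :: rw) (y :: rs) = (pairOk (x, y) && checkB rw rs) := by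
  simp [checkB, Bool.and_left_comm]

theorem goA_eq_checkB (w s : List Char) : goA w s = checkB (rleB w) (rleB s) := by
  fun_induction goA w s with
  | case1 c w d s hcd =>
    rw [rleB, rleB, checkB_cons]
    have : pairOk ((c, 1 + (w.takeWhile (· == c)).length),
        (d, 1 + (s.takeWhile (· == d)).length)) = false := by
      simp [pairOk]; intro h; exact absurd h hcd
    simp [this]
  | case2 c w d s hcd ci cj h1 =>
    simp only [not_not] at hcd; subst hcd
    rw [rleB, rleB, checkB_cons]
    simp only [ci, cj, countSkip_eq] at h1
    have : pairOk ((c, 1 + (w.takeWhile (· == c)).length),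
        (c, 1 + (s.takeWhile (· == c)).length)) = false := by
      simp [pairOk]; omega
    simp [this]
  | case3 c w d s hcd ci cj h1 h2 =>
    simp only [not_not] at hcd; subst hcd
    rw [rleB, rleB, checkB_cons]
    simp only [ci, cj, countSkip_eq] at h2
    have : pairOk ((c, 1 + (w.takeWhile (· == c)).length),
        (c, 1 + (s.takeWhile (· == c)).length)) = false := by
      simp [pairOk]; omega
    simp [this]
  | case4 c w d s hcd ci cj h1 h2 ih =>
    simp only [not_not] at hcd; subst hcd
    rw [rleB, rleB, checkB_cons, ih]
    simp only [ci, cj, countSkip_eq] at h1 h2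
    have : pairOk ((c, 1 + (w.takeWhile (· == c)).length),
        (c, 1 + (s.takeWhile (· == c)).length)) = true := by
      simp [pairOk]; omega
    rw [countSkip_eq, countSkip_eq, this]
    simp
  | case5 w s h =>
    match w, s with
    | [], [] => simp [rleB, checkB]
    | [], d :: s => simp [rleB, checkB]
    | c :: w, [] => simp [rleB, checkB]
    | c :: w, d :: s => exact absurd (h c w d s rfl rfl) not_false

-- ===== VERDICT (by name: the statement is the Claim_ definition above) =====
theorem is_stretchy_spec : Claim_equal_is_stretchy := by
  intro word s _
  unfold Spec_is_stretchy is_stretchy is_stretchy_alt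
  exact goA_eq_checkB word.toList s.toList
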